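-- pv_equiv track=rewrite | github.com/Andy11-villi/Progra-2025 | proyecto finalAndy.py | buscar_kozak_shine
-- ===== SOURCE A (Python) =====
-- def buscar_kozak_shine(secuencia, pos_inicio):
--     kozak = False
--     shine = False
--
--     # Shine-Dalgarno
--     if pos_inicio >= 6:
--         for i in range(3, 11):
--             if pos_inicio >= i + 6:
--                 region = secuencia[pos_inicio-i-6:pos_inicio-i]
--                 if region == 'AGGAGG':
--                     shine = True
--                     break
--
--     # Kozak
--     if pos_inicio >= 15:
--         region = secuencia[pos_inicio-15:pos_inicio+5]
--         if 'GCCACCATGG' in region: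
--             kozak = True
--
--     return kozak, shine
-- ===== SOURCE B (Python) =====
-- def buscar_kozak_shine(secuencia, pos_inicio):
--     # Index every full occurrence of each motif across the whole sequence once,
--     # then decide each flag by interval arithmetic on the occurrence positions.
--     def occ(motif):
--         return [s for s in range(len(secuencia)) if secuencia.startswith(motif, s)]
--     shine = any(pos_inicio - 16 <= s <= pos_inicio - 9 for s in occ('AGGAGG'))
--     kozak = pos_inicio >= 15 and any(pos_inicio - 15 <= s <= pos_inicio - 5 for s in occ('GCCACCATGG'))
--     return kozak, shine
-- ===== Notes on version B (the rewrite author's own statement) =====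
-- stated objective: alternative
-- what changed: Instead of A's fixed-window scans near pos_inicio (an 8-offset slice-equality loop for Shine-Dalgarno and an 'in' search on a 20-char slice for Kozak), B builds a global occurrence index of each motif over the whole sequence once and then decides each flag purely by interval arithmetic on the occurrence positions.
import Mathlib
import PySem

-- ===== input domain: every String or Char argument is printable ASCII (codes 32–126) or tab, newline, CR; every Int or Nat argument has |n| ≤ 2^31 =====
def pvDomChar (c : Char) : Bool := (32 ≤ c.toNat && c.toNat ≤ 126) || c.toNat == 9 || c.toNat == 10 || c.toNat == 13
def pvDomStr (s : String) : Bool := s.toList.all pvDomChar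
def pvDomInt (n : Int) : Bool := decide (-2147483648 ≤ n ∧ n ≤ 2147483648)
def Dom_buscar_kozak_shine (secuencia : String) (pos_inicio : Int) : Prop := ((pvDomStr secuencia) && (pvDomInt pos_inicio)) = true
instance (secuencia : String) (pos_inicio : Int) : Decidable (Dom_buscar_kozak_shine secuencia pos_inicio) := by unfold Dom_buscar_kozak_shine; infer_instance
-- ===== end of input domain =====

-- B indexes every full occurrence of each motif across the whole sequence once and decides each flag by interval arithmetic on occurrence positions (alternative decomposition); A scans fixed windows near pos_inicio.


-- ===== PORT A =====
-- the 'for i in range(3, 11): … break' loop of A, as structural recursion with early exit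
def pvShineLoopA (secuencia : String) (pos_inicio : Int) : List Int → Bool
  | [] => false
  | i :: rest =>
      if pos_inicio ≥ i + 6 then
        if PySem.Str.slice secuencia (some (pos_inicio - i - 6)) (some (pos_inicio - i)) = "AGGAGG" then
          true
        else pvShineLoopA secuencia pos_inicio rest
      else pvShineLoopA secuencia pos_inicio rest

def buscar_kozak_shine (secuencia : String) (pos_inicio : Int) : Bool × Bool :=
  let shine := if pos_inicio ≥ 6 then pvShineLoopA secuencia pos_inicio (PySem.List.pyRange 3 11 1) else false
  let kozak := if pos_inicio ≥ 15 then
      PySem.Str.isIn "GCCACCATGG" (PySem.Str.slice secuencia (some (pos_inicio - 15)) (some (pos_inicio + 5)))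
    else false
  (kozak, shine)

-- ===== PORT B =====
-- occ(motif) = [s for s in range(len(secuencia)) if secuencia.startswith(motif, s)]
-- secuencia.startswith(motif, s) ported by hand as an anchored prefix test on the drop at s:
-- exact for 0 ≤ s < len(secuencia), which holds for every s produced by range(len(secuencia)).
def pvOcc (secuencia : String) (motif : String) : List Int :=
  (PySem.List.pyRange 0 (PySem.Str.len secuencia) 1).filter
    (fun s => PySem.Chars.startswith (secuencia.toList.drop s.toNat) motif.toList)

def buscar_kozak_shine_alt (secuencia : String) (pos_inicio : Int) : Bool × Bool :=
  let shine := (pvOcc secuencia "AGGAGG").any (fun s => decide (pos_inicio - 16 ≤ s ∧ s ≤ pos_inicio - 9))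
  let kozak := decide (pos_inicio ≥ 15) &&
    (pvOcc secuencia "GCCACCATGG").any (fun s => decide (pos_inicio - 15 ≤ s ∧ s ≤ pos_inicio - 5))
  (kozak, shine)

-- ===== PRECONDITION & SPEC =====
def Spec_buscar_kozak_shine (secuencia : String) (pos_inicio : Int) (out : Bool × Bool) : Prop := out = buscar_kozak_shine_alt secuencia pos_inicio
instance (secuencia : String) (pos_inicio : Int) (out : Bool × Bool) : Decidable (Spec_buscar_kozak_shine secuencia pos_inicio out) := by unfold Spec_buscar_kozak_shine; infer_instance

-- ===== CLAIM (what is proved, stated in full; the proofs are below) =====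
def Claim_equal_buscar_kozak_shine : Prop := ∀ (secuencia : String) (pos_inicio : Int), Dom_buscar_kozak_shine secuencia pos_inicio → Spec_buscar_kozak_shine secuencia pos_inicio (buscar_kozak_shine secuencia pos_inicio)

-- ===== LEMMAS AND PROOFS =====

theorem pv_str_eq_iff (s t : String) : s = t ↔ s.toList = t.toList :=
  ⟨fun h => by rw [h], fun h => String.ext h⟩

-- A's per-offset slice equality, as a prefix fact at the start position p
theorem pv_sliceA_iff (secuencia : String) (p q : Int) (hp : 0 ≤ p) (hq : q = p + 6) :
    PySem.Str.slice secuencia (some p) (some q) = "AGGAGG" ↔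
      "AGGAGG".toList <+: secuencia.toList.drop p.toNat := by
  subst hq
  rw [pv_str_eq_iff, PySem.Str.toList_slice]
  rw [show PySem.Chars.slice secuencia.toList (some p) (some (p + 6)) =
        PySem.List.slice secuencia.toList (some p) (some (p + 6)) from rfl]
  rw [PySem.List.slice_toNat _ hp (by omega)]
  rw [show (p + 6).toNat - p.toNat = 6 from by omega]
  rw [List.prefix_iff_eq_take]
  rw [show ("AGGAGG".toList).length = 6 from rfl]
  exact eq_comm

theorem pv_loopA_iff (secuencia : String) (pos_inicio : Int) (l : List Int) :
    pvShineLoopA secuencia pos_inicio l = true ↔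
      ∃ i ∈ l, pos_inicio ≥ i + 6 ∧
        PySem.Str.slice secuencia (some (pos_inicio - i - 6)) (some (pos_inicio - i)) = "AGGAGG" := by
  induction l with
  | nil => simp [pvShineLoopA]
  | cons i rest ih =>
    simp only [pvShineLoopA, List.mem_cons]
    split_ifs with h1 h2
    · simp only [true_iff]
      exact ⟨i, Or.inl rfl, h1, h2⟩
    · rw [ih]
      constructor
      · rintro ⟨k, hk, h⟩; exact ⟨k, Or.inr hk, h⟩
      · rintro ⟨k, hk, h⟩
        rcases hk with rfl | hk
        · exact absurd h.2 h2
        · exact ⟨k, hk, h⟩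
    · rw [ih]
      constructor
      · rintro ⟨k, hk, h⟩; exact ⟨k, Or.inr hk, h⟩
      · rintro ⟨k, hk, h⟩
        rcases hk with rfl | hk
        · exact absurd h.1 h1
        · exact ⟨k, hk, h⟩

-- B's occurrence index restricted to an interval, as an existential
theorem pv_occ_any_iff (secuencia motif : String) (lo hi : Int) (hm : motif.toList ≠ []) :
    ((pvOcc secuencia motif).any (fun s => decide (lo ≤ s ∧ s ≤ hi)) = true) ↔
      ∃ s : Int, 0 ≤ s ∧ lo ≤ s ∧ s ≤ hi ∧ motif.toList <+: secuencia.toList.drop s.toNat := by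
  unfold pvOcc
  rw [List.any_eq_true]
  constructor
  · rintro ⟨s, hs, hdec⟩
    rw [List.mem_filter] at hs
    obtain ⟨hrange, hstart⟩ := hs
    rw [PySem.List.mem_pyRange_one] at hrange
    rw [PySem.Chars.startswith_iff] at hstart
    rw [decide_eq_true_eq] at hdec
    exact ⟨s, hrange.1, hdec.1, hdec.2, hstart⟩
  · rintro ⟨s, h0, hlo, hhi, hpre⟩
    refine ⟨s, ?_, by rw [decide_eq_true_eq]; exact ⟨hlo, hhi⟩⟩
    rw [List.mem_filter, PySem.List.mem_pyRange_one, PySem.Chars.startswith_iff]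
    have hlen := hpre.length_le
    rw [List.length_drop] at hlen
    have hmpos : 0 < motif.toList.length := List.length_pos_iff.mpr hm
    have hslt : s.toNat < secuencia.toList.length := by omega
    refine ⟨⟨h0, ?_⟩, hpre⟩
    have : PySem.Str.len secuencia = (secuencia.toList.length : Int) := by
      simp [PySem.Str.len_eq]
    omega

-- B's window search (A's kozak 'in' on a slice), as an existential over offsets inside the window
theorem pv_isIn_window_iff (m : List Char) (hm : m ≠ []) (L : List Char) (a t : Nat) :
    PySem.Chars.isIn m ((L.drop a).take t) = true ↔
      ∃ j : Nat, j + m.length ≤ t ∧ m <+: L.drop (a + j) := by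
  rw [← PySem.Chars.exists_prefix_drop_iff_isIn]
  constructor
  · rintro ⟨j, hj⟩
    rw [List.drop_take, List.drop_drop, List.prefix_take_iff] at hj
    obtain ⟨h1, h2⟩ := hj
    have hmpos : 0 < m.length := List.length_pos_iff.mpr hm
    exact ⟨j, by omega, h1⟩
  · rintro ⟨j, hj1, hj2⟩
    refine ⟨j, ?_⟩
    rw [List.drop_take, List.drop_drop, List.prefix_take_iff]
    exact ⟨hj2, by omega⟩

-- the shine components agree
theorem pv_shine_eq (secuencia : String) (pos_inicio : Int) :
    (if pos_inicio ≥ 6 then pvShineLoopA secuencia pos_inicio (PySem.List.pyRange 3 11 1) else false)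
    = (pvOcc secuencia "AGGAGG").any (fun s => decide (pos_inicio - 16 ≤ s ∧ s ≤ pos_inicio - 9)) := by
  by_cases h9 : pos_inicio ≥ 9
  · rw [if_pos (by omega)]
    rw [show PySem.List.pyRange 3 11 1 = [3,4,5,6,7,8,9,10] from by decide]
    rw [Bool.eq_iff_iff, pv_loopA_iff, pv_occ_any_iff _ _ _ _ (by decide)]
    constructor
    · rintro ⟨i, hi, hge, hsl⟩
      have hi' : 3 ≤ i ∧ i ≤ 10 := by simp only [List.mem_cons, List.not_mem_nil, or_false] at hi; omega
      have hp : (0:Int) ≤ pos_inicio - i - 6 := by omega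
      rw [pv_sliceA_iff _ _ _ hp (by ring)] at hsl
      exact ⟨pos_inicio - i - 6, hp, by omega, by omega, hsl⟩
    · rintro ⟨s, h0, hlo, hhi, hpre⟩
      refine ⟨pos_inicio - s - 6, ?_, by omega, ?_⟩
      · simp only [List.mem_cons, List.not_mem_nil, or_false]; omega
      · have hp : (0:Int) ≤ pos_inicio - (pos_inicio - s - 6) - 6 := by omega
        rw [pv_sliceA_iff _ _ _ hp (by ring)]
        rw [show (pos_inicio - (pos_inicio - s - 6) - 6).toNat = s.toNat from by omega]
        exact hpre
  · have hB : ((pvOcc secuencia "AGGAGG").any (fun s => decide (pos_inicio - 16 ≤ s ∧ s ≤ pos_inicio - 9))) = false := by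
      rw [← Bool.not_eq_true, pv_occ_any_iff _ _ _ _ (by decide)]
      rintro ⟨s, h0, -, hhi, -⟩
      omega
    rw [hB]
    split_ifs with h6
    · rw [← Bool.not_eq_true, pv_loopA_iff]
      rintro ⟨i, hi, hge, -⟩
      rw [show PySem.List.pyRange 3 11 1 = [3,4,5,6,7,8,9,10] from by decide] at hi
      simp only [List.mem_cons, List.not_mem_nil, or_false] at hi
      omega
    · rfl

-- the kozak components agree
theorem pv_kozak_eq (secuencia : String) (pos_inicio : Int) :
    (if pos_inicio ≥ 15 then
        PySem.Str.isIn "GCCACCATGG" (PySem.Str.slice secuencia (some (pos_inicio - 15)) (some (pos_inicio + 5)))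
      else false)
    = (decide (pos_inicio ≥ 15) &&
        (pvOcc secuencia "GCCACCATGG").any (fun s => decide (pos_inicio - 15 ≤ s ∧ s ≤ pos_inicio - 5))) := by
  by_cases h15 : pos_inicio ≥ 15
  · rw [if_pos h15, decide_eq_true h15, Bool.true_and]
    rw [PySem.Str.isIn_eq, PySem.Str.toList_slice]
    rw [show PySem.Chars.slice secuencia.toList (some (pos_inicio - 15)) (some (pos_inicio + 5)) =
          PySem.List.slice secuencia.toList (some (pos_inicio - 15)) (some (pos_inicio + 5)) from rfl]
    rw [PySem.List.slice_toNat _ (by omega) (by omega)]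
    rw [show (pos_inicio + 5).toNat - (pos_inicio - 15).toNat = 20 from by omega]
    rw [Bool.eq_iff_iff, pv_isIn_window_iff _ (by decide), pv_occ_any_iff _ _ _ _ (by decide)]
    rw [show ("GCCACCATGG".toList).length = 10 from rfl]
    constructor
    · rintro ⟨j, hj, hpre⟩
      refine ⟨((pos_inicio - 15).toNat + j : Nat), by omega, by omega, by omega, ?_⟩
      rw [show (((pos_inicio - 15).toNat + j : Nat) : Int).toNat = (pos_inicio - 15).toNat + j from by omega]
      exact hpre
    · rintro ⟨s, h0, hlo, hhi, hpre⟩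
      refine ⟨s.toNat - (pos_inicio - 15).toNat, by omega, ?_⟩
      rw [show (pos_inicio - 15).toNat + (s.toNat - (pos_inicio - 15).toNat) = s.toNat from by omega]
      exact hpre
  · rw [if_neg h15, decide_eq_false h15, Bool.false_and]

-- ===== VERDICT (by name: the statement is the Claim_ definition above) =====
theorem buscar_kozak_shine_spec : Claim_equal_buscar_kozak_shine := by
  intro secuencia pos_inicio _
  unfold Spec_buscar_kozak_shine buscar_kozak_shine buscar_kozak_shine_alt
  exact Prod.ext (pv_kozak_eq secuencia pos_inicio) (pv_shine_eq secuencia pos_inicio)
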